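-- pv_equiv track=rewrite | github.com/Vorkits/margin_parcer | dict_divide.py | linch_dict_divider
-- ===== SOURCE A (Python) =====
-- def linch_dict_divider(raw_dict, num):
--     list_result = []
--     len_raw_dict = len(raw_dict)
--     if len_raw_dict > num:
--         base_num = len_raw_dict // num
--         addr_num = len_raw_dict % num
--         for i in range(num):
--             this_dict = dict()
--             keys = list()
--             if addr_num > 0:
--
--                 keys = list(raw_dict.keys())[:base_num + 1]
--                 addr_num -= 1
--             else:
--                 keys = list(raw_dict.keys())[:base_num]
--             for key in keys:
--                 this_dict[key] = raw_dict[key]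
--                 del raw_dict[key]
--             list_result.append(this_dict)
--
--     else:
--         for d in raw_dict:
--             this_dict = dict()
--             this_dict[d] = raw_dict[d]
--             list_result.append(this_dict)
--
--     return list_result
-- ===== SOURCE B (Python) =====
-- def linch_dict_divider(raw_dict, num):
--     # Note: unlike A, B does not mutate raw_dict (A empties it when len(raw_dict) > num > 0).
--     n = len(raw_dict)
--     if n <= num:
--         return [{k: v} for k, v in raw_dict.items()]
--     if num <= 0:
--         return []
--     items = list(raw_dict.items())
--     base, extra = divmod(n, num)
--     result = []
--     start = 0
--     for i in range(num):
--         size = base + 1 if i < extra else base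
--         result.append(dict(items[start:start + size]))
--         start += size
--     return result
-- ===== Notes on version B (the rewrite author's own statement) =====
-- stated objective: faster
-- what changed: A makes num passes, each rebuilding the full key list of a shrinking dict and deleting the chunk's keys one by one; B makes a single pass over the items list, cutting it into successive slices at precomputed chunk sizes, and never mutates the input.
import Mathlib
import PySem

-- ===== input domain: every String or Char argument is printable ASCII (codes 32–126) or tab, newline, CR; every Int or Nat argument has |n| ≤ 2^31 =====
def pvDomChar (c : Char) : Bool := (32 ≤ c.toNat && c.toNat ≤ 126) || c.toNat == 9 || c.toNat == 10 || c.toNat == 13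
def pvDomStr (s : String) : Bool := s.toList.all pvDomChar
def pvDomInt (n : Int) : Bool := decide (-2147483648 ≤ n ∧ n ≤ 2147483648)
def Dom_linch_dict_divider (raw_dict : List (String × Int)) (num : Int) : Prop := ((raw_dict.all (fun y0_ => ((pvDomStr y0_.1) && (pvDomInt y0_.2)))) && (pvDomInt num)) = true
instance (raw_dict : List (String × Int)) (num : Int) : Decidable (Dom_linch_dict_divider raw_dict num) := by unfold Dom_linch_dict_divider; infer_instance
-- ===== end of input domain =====

-- B replaces A's per-chunk rebuild of the key list over a shrinking dict (with per-key deletion)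
-- by a single pass of successive slices of the items list; equivalence is about the RETURN value
-- only (A empties raw_dict in place when len(raw_dict) > num > 0; B never mutates it).

-- ===== PORT A =====
-- body of A's outer 'for i in range(num)' loop; state = (raw_dict, addr_num, list_result)
def pvStepA (base_num : Int)
    (st : PySem.Dict String Int × Int × List (List (String × Int))) (_i : Int) :
    PySem.Dict String Int × Int × List (List (String × Int)) :=
  let d := st.1
  let addr_num := st.2.1
  let ka : List String × Int :=
    if addr_num > 0 then
      (PySem.List.slice (PySem.Dict.keys d) none (some (base_num + 1)), addr_num - 1)
    else
      (PySem.List.slice (PySem.Dict.keys d) none (some base_num), addr_num)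
  let inner := ka.1.foldl
    (fun (p : PySem.Dict String Int × PySem.Dict String Int) key =>
      (p.1.insert key (p.2.getD key 0), p.2.erase key))
    (PySem.Dict.empty, d)
  (inner.2, ka.2, st.2.2 ++ [inner.1.items])

def linch_dict_divider (raw_dict : List (String × Int)) (num : Int) : List (List (String × Int)) :=
  let d0 : PySem.Dict String Int := PySem.Dict.mk raw_dict
  let len_raw_dict : Int := (PySem.Dict.size d0 : Int)
  if len_raw_dict > num then
    let base_num := PySem.Int.floordiv len_raw_dict num
    let addr_num := PySem.Int.mod len_raw_dict num
    ((PySem.List.pyRange 0 num 1).foldl (pvStepA base_num) (d0, addr_num, [])).2.2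
  else
    -- 'for d in raw_dict: this_dict = {d: raw_dict[d]}; list_result.append(this_dict)'
    raw_dict.foldl
      (fun res p => res ++ [(PySem.Dict.insert PySem.Dict.empty p.1 (d0.getD p.1 0)).items]) []

-- ===== PORT B =====
-- body of B's single 'for i in range(num)' loop; state = (result, start)
def pvStepB (items : List (String × Int)) (base extra : Int)
    (st : List (List (String × Int)) × Int) (i : Int) :
    List (List (String × Int)) × Int :=
  let size := if i < extra then base + 1 else base
  (st.1 ++ [(PySem.Dict.ofList (PySem.List.slice items (some st.2) (some (st.2 + size)))).items],
   st.2 + size)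

def linch_dict_divider_alt (raw_dict : List (String × Int)) (num : Int) : List (List (String × Int)) :=
  let n : Int := (raw_dict.length : Int)
  if n ≤ num then
    raw_dict.map (fun kv => [(kv.1, kv.2)])   -- '{k: v}' is the one-entry dict, as an items list
  else if num ≤ 0 then
    []
  else
    let items := raw_dict
    let base := PySem.Int.floordiv n num
    let extra := PySem.Int.mod n num
    ((PySem.List.pyRange 0 num 1).foldl (pvStepB items base extra) ([], 0)).1

-- ===== PRECONDITION & SPEC =====
-- Pre_ excludes (a) inputs where A raises ZeroDivisionError (num = 0 with a non-empty dict), and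
-- (b) association lists with duplicate keys, which do not represent any Python dict (the raw_dict
-- parameter is a dict, whose keys are necessarily distinct).
def Pre_linch_dict_divider (raw_dict : List (String × Int)) (num : Int) : Prop :=
  (raw_dict.map Prod.fst).Nodup ∧ (num = 0 → raw_dict = [])
instance (raw_dict : List (String × Int)) (num : Int) : Decidable (Pre_linch_dict_divider raw_dict num) := by
  unfold Pre_linch_dict_divider; infer_instance

def pvWitness_linch_dict_divider : (List (String × Int)) × Int :=
  ([("a", 1), ("b", 2), ("c", 3)], 2)

def Spec_linch_dict_divider (raw_dict : List (String × Int)) (num : Int) (out : List (List (String × Int))) : Prop := out = linch_dict_divider_alt raw_dict num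
instance (raw_dict : List (String × Int)) (num : Int) (out : List (List (String × Int))) : Decidable (Spec_linch_dict_divider raw_dict num out) := by unfold Spec_linch_dict_divider; infer_instance

-- ===== CLAIM (what is proved, stated in full; the proofs are below) =====
def Claim_equal_linch_dict_divider : Prop := ∀ (raw_dict : List (String × Int)) (num : Int), Dom_linch_dict_divider raw_dict num → Pre_linch_dict_divider raw_dict num → Spec_linch_dict_divider raw_dict num (linch_dict_divider raw_dict num)

-- ===== LEMMAS AND PROOFS =====

-- common specification of both loops: successive chunks of M, one element longer while r > 0;
-- pvChunks decrements r every round (B's 'i < extra'), pvChunksA only while it is positive (A's addr_num)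
def pvChunks (base : Int) : Nat → Int → List (String × Int) → List (List (String × Int))
  | 0, _, _ => []
  | n+1, r, M =>
      M.take (if 0 < r then (base+1).toNat else base.toNat) ::
        pvChunks base n (r-1) (M.drop (if 0 < r then (base+1).toNat else base.toNat))

def pvChunksA (base : Int) : Nat → Int → List (String × Int) → List (List (String × Int))
  | 0, _, _ => []
  | n+1, r, M =>
      M.take (if 0 < r then (base+1).toNat else base.toNat) ::
        pvChunksA base n (if 0 < r then r-1 else r) (M.drop (if 0 < r then (base+1).toNat else base.toNat))

lemma pvChunks_nonpos (base : Int) (n : Nat) :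
    ∀ (r r' : Int) (M : List (String × Int)), r ≤ 0 → r' ≤ 0 →
      pvChunks base n r M = pvChunks base n r' M := by
  induction n with
  | zero => intro r r' M _ _; rfl
  | succ n ih =>
      intro r r' M hr hr'
      simp only [pvChunks, if_neg (by omega : ¬ 0 < r), if_neg (by omega : ¬ 0 < r')]
      rw [ih (r-1) (r'-1) _ (by omega) (by omega)]

lemma pvChunksA_eq_pvChunks (base : Int) (n : Nat) :
    ∀ (r : Int) (M : List (String × Int)), 0 ≤ r →
      pvChunksA base n r M = pvChunks base n r M := by
  induction n with
  | zero => intro r M _; rfl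
  | succ n ih =>
      intro r M hr
      by_cases h : 0 < r
      · simp only [pvChunksA, pvChunks, if_pos h]
        rw [ih (r-1) _ (by omega)]
      · simp only [pvChunksA, pvChunks, if_neg h]
        rw [ih r _ hr, pvChunks_nonpos base n r (r-1) _ (by omega) (by omega)]

-- A's inner loop: taking the first k keys of a dict copies that prefix and deletes it
lemma pvInnerA :
    ∀ (M : List (String × Int)) (k : Nat) (t : PySem.Dict String Int),
      (M.map Prod.fst).Nodup → (∀ p ∈ M, t.contains p.1 = false) →
      ((M.map Prod.fst).take k).foldl
          (fun (p : PySem.Dict String Int × PySem.Dict String Int) key =>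
            (p.1.insert key (p.2.getD key 0), p.2.erase key))
          (t, PySem.Dict.mk M)
        = (PySem.Dict.mk (t.items ++ M.take k), PySem.Dict.mk (M.drop k)) := by
  intro M
  induction M with
  | nil => intro k t _ _; simp
  | cons p T ih =>
    obtain ⟨a, v⟩ := p
    intro k t hnd hfresh
    match k with
    | 0 => simp
    | Nat.succ k =>
      have hmem : a ∉ T.map Prod.fst := (List.nodup_cons.mp (by simpa using hnd)).1
      have ha : ∀ q ∈ T, ¬ (q.1 = a) := by
        intro q hq h
        exact hmem (h ▸ List.mem_map_of_mem hq)
      have hget : (PySem.Dict.mk ((a,v) :: T)).getD a 0 = v := by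
        simp [PySem.Dict.getD, PySem.Dict.get?_mk_cons]
      have herase : (PySem.Dict.mk ((a,v) :: T)).erase a = PySem.Dict.mk T := by
        simp only [PySem.Dict.erase]
        congr 1
        simp only [List.filter_cons]
        norm_num
        exact fun s b h => ha (s, b) h
      have hta : t.contains a = false := hfresh (a, v) (by simp)
      simp only [List.map_cons, List.take_succ_cons, List.foldl_cons, hget, herase]
      rw [ih k (t.insert a v) (by simpa using (List.nodup_cons.mp (by simpa using hnd)).2)
            (fun q hq => by
              rw [PySem.Dict.contains_insert]
              simp [ha q hq, hfresh q (List.mem_cons_of_mem _ hq)])]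
      rw [PySem.Dict.items_insert_of_not_contains t v hta]
      simp

lemma pvStepA_eq (base : Int) (hbase : 0 ≤ base) (M : List (String × Int)) (r : Int)
    (acc : List (List (String × Int))) (x : Int) (hnd : (M.map Prod.fst).Nodup) :
    pvStepA base (PySem.Dict.mk M, r, acc) x
      = (PySem.Dict.mk (M.drop (if 0 < r then (base+1).toNat else base.toNat)),
         (if 0 < r then r - 1 else r),
         acc ++ [M.take (if 0 < r then (base+1).toNat else base.toNat)]) := by
  have hkeys : PySem.Dict.keys (PySem.Dict.mk M) = M.map Prod.fst := rfl
  have h1 : base + 1 = (((base+1).toNat : Nat) : Int) := (Int.toNat_of_nonneg (by omega)).symm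
  have h0 : base = ((base.toNat : Nat) : Int) := (Int.toNat_of_nonneg hbase).symm
  by_cases hr : 0 < r
  · simp only [pvStepA, hkeys, if_pos (show r > 0 from hr)]
    rw [h1, PySem.List.slice_to_natCast,
      pvInnerA M _ PySem.Dict.empty hnd (fun p _ => rfl)]
    simp [PySem.Dict.empty]
    congr 1; omega
  · simp only [pvStepA, hkeys, if_neg (show ¬ r > 0 from hr)]
    rw [h0, PySem.List.slice_to_natCast,
      pvInnerA M _ PySem.Dict.empty hnd (fun p _ => rfl)]
    simp [PySem.Dict.empty]
    congr 1; omega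

-- A's outer loop, over any index list (the loop body ignores the index)
lemma pvLoopA (base : Int) (hbase : 0 ≤ base) :
    ∀ (l : List Int) (M : List (String × Int)) (r : Int) (acc : List (List (String × Int))),
      (M.map Prod.fst).Nodup →
      (l.foldl (pvStepA base) (PySem.Dict.mk M, r, acc)).2.2
        = acc ++ pvChunksA base l.length r M := by
  intro l
  induction l with
  | nil => intro M r acc _; simp [pvChunksA]
  | cons x l ih =>
    intro M r acc hnd
    simp only [List.foldl_cons, pvStepA_eq base hbase M r acc x hnd]
    rw [ih _ _ _ (by
      rw [List.map_drop]
      exact hnd.sublist (List.drop_sublist _ _))]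
    simp [pvChunksA, List.length_cons]

lemma pvOfListNodup :
    ∀ (l : List (String × Int)), (l.map Prod.fst).Nodup → (PySem.Dict.ofList l).items = l := by
  intro l hnd
  show (PySem.Dict.update PySem.Dict.empty l).items = l
  rw [show PySem.Dict.update PySem.Dict.empty l
        = l.foldl (fun (d : PySem.Dict String Int) p => d.insert p.1 p.2) PySem.Dict.empty from rfl]
  rw [PySem.Dict.items_foldl_insert_fresh l Prod.fst Prod.snd PySem.Dict.empty (fun p _ => rfl) hnd]
  simp [PySem.Dict.empty]

-- B's loop over range(i, i+n)
lemma pvLoopB (L : List (String × Int)) (base extra : Int) (hbase : 0 ≤ base)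
    (hnd : (L.map Prod.fst).Nodup) :
    ∀ (n : Nat) (i s : Int) (acc : List (List (String × Int))), 0 ≤ s →
      ((PySem.List.pyRange i (i + n) 1).foldl (pvStepB L base extra) (acc, s)).1
        = acc ++ pvChunks base n (extra - i) (L.drop s.toNat) := by
  intro n
  induction n with
  | zero =>
    intro i s acc _
    rw [show i + (0:Nat) = i by omega]
    simp [PySem.List.pyRange, pvChunks]
  | succ n ih =>
    intro i s acc hs
    rw [show ((n+1 : Nat) : Int) = (n:Int)+1 by push_cast; ring]
    rw [PySem.List.pyRange_one_cons (by omega : i < i + ((n:Int)+1))]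
    set size : Int := if i < extra then base + 1 else base with hsize
    have hsz : 0 ≤ size := by rw [hsize]; split <;> omega
    have hslice : PySem.List.slice L (some s) (some (s + size)) = (L.drop s.toNat).take size.toNat := by
      conv_lhs => rw [show s = ((s.toNat : Nat) : Int) from (Int.toNat_of_nonneg hs).symm,
                      show size = ((size.toNat : Nat) : Int) from (Int.toNat_of_nonneg hsz).symm]
      exact PySem.List.slice_natCast_add L s.toNat size.toNat
    have hof : (PySem.Dict.ofList ((L.drop s.toNat).take size.toNat)).items
        = (L.drop s.toNat).take size.toNat := by
      apply pvOfListNodup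
      rw [List.map_take, List.map_drop]
      exact (hnd.sublist (List.drop_sublist _ _)).sublist (List.take_sublist _ _)
    have hstep : pvStepB L base extra (acc, s) i
        = (acc ++ [(L.drop s.toNat).take size.toNat], s + size) := by
      simp only [pvStepB, ← hsize, hslice, hof]
    rw [List.foldl_cons, hstep,
        show i + ((n:Int)+1) = (i+1) + (n:Int) by omega,
        ih (i+1) (s + size) _ (by omega)]
    have hk : (if 0 < extra - i then (base+1).toNat else base.toNat) = size.toNat := by
      rw [hsize]; by_cases h : i < extra
      · rw [if_pos (by omega), if_pos h]
      · rw [if_neg (by omega), if_neg h]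
    simp only [pvChunks, hk]
    rw [show (s + size).toNat = s.toNat + size.toNat by omega,
        ← List.drop_drop, show extra - (i+1) = extra - i - 1 by omega]
    simp

-- ===== VERDICT (by name: the statement is the Claim_ definition above) =====
theorem linch_dict_divider_spec : Claim_equal_linch_dict_divider := by
  intro raw_dict num _ hpre
  show linch_dict_divider raw_dict num = linch_dict_divider_alt raw_dict num
  have hpre' : (raw_dict.map Prod.fst).Nodup ∧ (num = 0 → raw_dict = []) := hpre
  obtain ⟨hnd, hzero⟩ := hpre'
  simp only [linch_dict_divider, linch_dict_divider_alt,
    show (PySem.Dict.mk raw_dict).size = raw_dict.length from rfl]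
  by_cases h : (raw_dict.length : Int) > num
  · rw [if_pos h, if_neg (by omega)]
    by_cases hnum : num ≤ 0
    · rw [if_pos hnum]
      have hr0 : PySem.List.pyRange (0 : Int) num 1 = [] := by
        simp [PySem.List.pyRange, show ¬ (0:Int) < num by omega]
      rw [hr0]
      rfl
    · rw [if_neg hnum]
      have hnpos : 0 < num := by omega
      set bs := PySem.Int.floordiv (raw_dict.length : Int) num with hbs
      set ex := PySem.Int.mod (raw_dict.length : Int) num with hex
      have hbase : 0 ≤ bs := by
        rw [hbs]
        exact (PySem.Int.le_floordiv_iff_mul_le hnpos).mpr (by rw [zero_mul]; omega)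
      have hextra : 0 ≤ ex := hex ▸ PySem.Int.mod_nonneg _ hnpos
      have hnum' : num = 0 + ((num.toNat : Nat) : Int) := by omega
      rw [hnum', pvLoopA _ hbase _ raw_dict _ _ hnd,
          pvLoopB raw_dict _ _ hbase hnd num.toNat 0 0 [] le_rfl,
          zero_add]
      have hlen : (PySem.List.pyRange 0 ((num.toNat : Nat) : Int) 1).length = num.toNat := by
        simp [PySem.List.pyRange]
        split_ifs <;> omega
      rw [hlen, pvChunksA_eq_pvChunks _ _ _ _ hextra]
      simp
  · rw [if_neg h, if_pos (by omega)]
    rw [PySem.List.foldl_append_singleton_eq_map, List.nil_append]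
    apply List.map_congr_left
    intro p hp
    have hget : (PySem.Dict.mk raw_dict).getD p.1 0 = p.2 :=
      PySem.Dict.getD_of_mem_items _
        (show (p.1, p.2) ∈ (PySem.Dict.mk raw_dict).items by simpa using hp)
        (show ((PySem.Dict.mk raw_dict).keys).Nodup from hnd) 0
    rw [hget]
    rfl
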